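-- pv_equiv track=rewrite | github.com/Protino/HackerRank | Contests/HourRank 20/hot&Cold.py | countSubs
-- ===== SOURCE A (Python) =====
-- def countSubs(s):
--     n = len(s)
--     masks = [1<<j for j in range(n)]
--     count=0
--     for i in range(1,2**n):
--         ss =  [s[j] for j in range(n) if (masks[j] & i)]
--         if ss.count('a') == ss.count('b') and ss.count('c') == ss.count('d'):
--             count+=1
--
--     return count%(9+10**7)
-- ===== SOURCE B (Python) =====
-- def countSubs(s):
--     M = 10**7 + 9
--     na = s.count('a'); nb = s.count('b')
--     nc = s.count('c'); nd = s.count('d')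
--     m = len(s) - na - nb - nc - nd
--
--     def comb(n, k):
--         c = 1
--         for i in range(k):
--             c = c * (n - i) // (i + 1)
--         return c
--
--     return (comb(na + nb, na) * comb(nc + nd, nc) * 2 ** m - 1) % M
-- ===== Notes on version B (the rewrite author's own statement) =====
-- stated objective: faster
-- what changed: A enumerates all 2^n bitmask subsequences and counts those with equal a/b and c/d counts; B counts the letters in one pass and evaluates the closed form C(na+nb,na)*C(nc+nd,nc)*2^others - 1 (Vandermonde identity), then takes the result mod 10^7+9.
import Mathlib
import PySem

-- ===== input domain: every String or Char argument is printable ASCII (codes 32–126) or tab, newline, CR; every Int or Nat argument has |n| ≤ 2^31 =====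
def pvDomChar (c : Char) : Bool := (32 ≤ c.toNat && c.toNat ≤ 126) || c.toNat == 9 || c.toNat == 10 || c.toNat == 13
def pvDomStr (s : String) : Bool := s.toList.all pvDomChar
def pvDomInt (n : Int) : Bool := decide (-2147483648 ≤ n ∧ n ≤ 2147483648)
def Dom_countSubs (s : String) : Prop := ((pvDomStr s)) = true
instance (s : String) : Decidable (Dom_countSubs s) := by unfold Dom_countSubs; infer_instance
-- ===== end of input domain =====

-- B replaces A's O(2^n·n) enumeration of all bitmask subsequences by the closed form
-- C(na+nb,na)·C(nc+nd,nc)·2^m − 1 (mod 10^7+9), computed in one pass over the string (objective: faster).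

-- ===== PORT A =====
-- literal port of A: masks = [1<<j], loop i over range(1, 2**n), build ss by bit tests, count.
-- `masks[j] & i` (both nonnegative here) is PySem.Int.band; truthiness of an int is ≠ 0;
-- s[j] is PySem.List.pyGet? on the code points (j is always in range, so the comprehension's
-- filterMap never meets `none`).
def countSubs (s : String) : Int :=
  let cs := s.toList
  let n : Int := (cs.length : Int)
  let masks : List Int := (PySem.List.pyRange 0 n).map (fun j => (1 : Int) <<< j.toNat)
  let count : Int :=
    (PySem.List.pyRange 1 ((2 : Int) ^ cs.length)).foldl
      (fun count i =>
        let ss : List Char :=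
          (PySem.List.pyRange 0 n).filterMap (fun j =>
            if PySem.Int.band (PySem.List.pyGetD masks j 0) i ≠ 0
            then PySem.List.pyGet? cs j else none)
        if PySem.List.count ss 'a' = PySem.List.count ss 'b' ∧
           PySem.List.count ss 'c' = PySem.List.count ss 'd'
        then count + 1 else count)
      0
  PySem.Int.mod count (9 + 10 ^ 7)

-- ===== PORT B =====
-- B's comb(n,k): c = 1; for i in range(k): c = c*(n-i)//(i+1)
def combLoop (n k : Int) : Int :=
  (PySem.List.pyRange 0 k).foldl (fun c i => PySem.Int.floordiv (c * (n - i)) (i + 1)) 1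

-- one pass over the string counting a/b/c/d/other, then the closed form, then % M
def countSubs_alt (s : String) : Int :=
  let M : Int := 10 ^ 7 + 9
  let t := s.toList.foldl (fun (t : Int × Int × Int × Int × Int) ch =>
      let (na, nb, nc, nd, m) := t
      if ch = 'a' then (na + 1, nb, nc, nd, m)
      else if ch = 'b' then (na, nb + 1, nc, nd, m)
      else if ch = 'c' then (na, nb, nc + 1, nd, m)
      else if ch = 'd' then (na, nb, nc, nd + 1, m)
      else (na, nb, nc, nd, m + 1)) (0, 0, 0, 0, 0)
  let (na, nb, nc, nd, m) := t
  PySem.Int.mod (combLoop (na + nb) na * combLoop (nc + nd) nc * (2 : Int) ^ m.toNat - 1) M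

-- ===== PRECONDITION & SPEC =====
def Spec_countSubs (s : String) (out : Int) : Prop := out = countSubs_alt s
instance (s : String) (out : Int) : Decidable (Spec_countSubs s out) := by unfold Spec_countSubs; infer_instance

-- ===== CLAIM (what is proved, stated in full; the proofs are below) =====
def Claim_equal_countSubs : Prop := ∀ (s : String), Dom_countSubs s → Spec_countSubs s (countSubs s)

-- ===== LEMMAS AND PROOFS =====

-- the subsequence of cs selected by the bits of i (bit 0 selects the head)
def subseq : List Char → Nat → List Char
  | [], _ => []
  | x :: r, i => if i % 2 = 1 then x :: subseq r (i / 2) else subseq r (i / 2)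

def dab (c : Char) : Int := if c = 'a' then 1 else if c = 'b' then -1 else 0
def dcd (c : Char) : Int := if c = 'c' then 1 else if c = 'd' then -1 else 0

def Okb (t : List Char) (da dc : Int) : Bool :=
  decide ((t.count 'a' : Int) - t.count 'b' + da = 0) &&
  decide ((t.count 'c' : Int) - t.count 'd' + dc = 0)

def G (cs : List Char) (da dc : Int) : Nat :=
  (List.range (2 ^ cs.length)).countP (fun i => Okb (subseq cs i) da dc)

-- binomial coefficient with an Int lower index (0 when negative)
def ich (n : Nat) (k : Int) : Nat := if k < 0 then 0 else n.choose k.toNat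

def nOther (cs : List Char) : Nat :=
  cs.countP (fun c => !(c = 'a' ∨ c = 'b' ∨ c = 'c' ∨ c = 'd' : Bool))

theorem subseq_zero (cs : List Char) : subseq cs 0 = [] := by
  induction cs with
  | nil => rfl
  | cons x r ih => simp [subseq, ih]

theorem subseq_two_mul (x : Char) (cs : List Char) (q : Nat) :
    subseq (x :: cs) (2 * q) = subseq cs q := by
  have h1 : (2 * q) % 2 = 0 := by omega
  have h2 : (2 * q) / 2 = q := by omega
  simp [subseq, h1, h2]

theorem subseq_two_mul_add_one (x : Char) (cs : List Char) (q : Nat) :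
    subseq (x :: cs) (2 * q + 1) = x :: subseq cs q := by
  have h1 : (2 * q + 1) % 2 = 1 := by omega
  have h2 : (2 * q + 1) / 2 = q := by omega
  simp [subseq, h1, h2]

theorem Okb_cons (x : Char) (t : List Char) (da dc : Int) :
    Okb (x :: t) da dc = Okb t (da + dab x) (dc + dcd x) := by
  simp only [Okb, dab, dcd, List.count_cons]
  by_cases ha : x = 'a' <;> by_cases hb : x = 'b' <;> by_cases hc : x = 'c' <;>
    by_cases hd : x = 'd' <;>
  simp_all <;> congr 1 <;> (rw [decide_eq_decide]; omega)

theorem countP_range_two_mul (p : Nat → Bool) (N : Nat) :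
    (List.range (2 * N)).countP p =
      (List.range N).countP (fun q => p (2 * q)) + (List.range N).countP (fun q => p (2 * q + 1)) := by
  induction N with
  | zero => rfl
  | succ n ih =>
      have h2 : 2 * (n + 1) = (2 * n + 1) + 1 := by ring
      rw [h2, List.range_succ, List.range_succ, List.countP_append, List.countP_append,
          List.range_succ, List.countP_append, List.countP_append, ih]
      simp [List.countP_cons]
      omega

theorem G_cons (x : Char) (cs : List Char) (da dc : Int) :
    G (x :: cs) da dc = G cs (da + dab x) (dc + dcd x) + G cs da dc := by
  have hl : (x :: cs).length = cs.length + 1 := rfl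
  have hp : 2 ^ (cs.length + 1) = 2 * 2 ^ cs.length := by ring
  rw [G, hl, hp, countP_range_two_mul]
  have h1 : ((List.range (2 ^ cs.length)).countP fun q => Okb (subseq (x :: cs) (2 * q)) da dc)
      = G cs da dc := by
    apply List.countP_congr; intro q _; rw [subseq_two_mul]
  have h2 : ((List.range (2 ^ cs.length)).countP fun q => Okb (subseq (x :: cs) (2 * q + 1)) da dc)
      = G cs (da + dab x) (dc + dcd x) := by
    apply List.countP_congr; intro q _; rw [subseq_two_mul_add_one, Okb_cons]
  rw [h1, h2]; omega

theorem ich_pascal (n : Nat) (j : Int) :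
    ich (n + 1) (j + 1) = ich n j + ich n (j + 1) := by
  unfold ich
  rcases lt_trichotomy j (-1) with h | h | h
  · rw [if_pos (by omega), if_pos (by omega), if_pos (by omega)]
  · subst h; norm_num
  · obtain ⟨jn, rfl⟩ : ∃ jn : Nat, j = jn := ⟨j.toNat, by omega⟩
    rw [if_neg (by omega), if_neg (by omega), if_neg (by omega)]
    have h1 : ((jn : Int) + 1).toNat = jn + 1 := by omega
    have h2 : ((jn : Int)).toNat = jn := by omega
    rw [h1, h2, Nat.choose_succ_succ]

theorem ich_zero (k : Int) : ich 0 k = if k = 0 then 1 else 0 := by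
  unfold ich
  rcases lt_trichotomy k 0 with h | h | h
  · rw [if_pos h, if_neg (by omega)]
  · subst h; norm_num
  · rw [if_neg (by omega), if_neg (by omega)]
    have : k.toNat = k.toNat - 1 + 1 := by omega
    rw [this, Nat.choose_zero_succ]

theorem ich_pascal_sub (n : Nat) (j : Int) :
    ich (n + 1) j = ich n (j - 1) + ich n j := by
  have h := ich_pascal n (j - 1)
  rw [sub_add_cancel] at h
  exact h

theorem G_closed (cs : List Char) (da dc : Int) :
    G cs da dc =
      ich (cs.count 'a' + cs.count 'b') ((cs.count 'a' : Int) + da) *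
      ich (cs.count 'c' + cs.count 'd') ((cs.count 'c' : Int) + dc) * 2 ^ nOther cs := by
  induction cs generalizing da dc with
  | nil =>
      simp only [G, nOther, List.length_nil, pow_zero, List.range_one, List.countP_cons,
        List.countP_nil, List.count_nil, Nat.cast_zero, zero_add, mul_one, subseq_zero, Okb]
      rw [ich_zero, ich_zero]
      by_cases h1 : da = 0 <;> by_cases h2 : dc = 0 <;> simp [h1, h2]
  | cons x cs ih =>
      rw [G_cons, ih, ih]
      by_cases ha : x = 'a'
      · subst ha
        simp [nOther, dab, dcd]
        rw [show cs.count 'a' + 1 + cs.count 'b' = (cs.count 'a' + cs.count 'b') + 1 from by omega]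
        rw [show ((cs.count 'a' : Int)) + 1 + da = ((cs.count 'a' : Int) + da) + 1 from by ring]
        rw [ich_pascal]
        rw [show ((cs.count 'a' : Int)) + (da + 1) = ((cs.count 'a' : Int) + da) + 1 from by ring]
        ring
      · by_cases hb : x = 'b'
        · subst hb
          simp [nOther, dab, dcd]
          rw [show cs.count 'a' + (cs.count 'b' + 1) = (cs.count 'a' + cs.count 'b') + 1 from by omega]
          rw [ich_pascal_sub]
          rw [show ((cs.count 'a' : Int)) + da - 1 = ((cs.count 'a' : Int)) + (da + -1) from by ring]
          ring
        · by_cases hc : x = 'c'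
          · subst hc
            simp [nOther, dab, dcd]
            rw [show cs.count 'c' + 1 + cs.count 'd' = (cs.count 'c' + cs.count 'd') + 1 from by omega]
            rw [show ((cs.count 'c' : Int)) + 1 + dc = ((cs.count 'c' : Int) + dc) + 1 from by ring]
            rw [ich_pascal]
            rw [show ((cs.count 'c' : Int)) + (dc + 1) = ((cs.count 'c' : Int) + dc) + 1 from by ring]
            ring
          · by_cases hd : x = 'd'
            · subst hd
              simp [nOther, dab, dcd]
              rw [show cs.count 'c' + (cs.count 'd' + 1) = (cs.count 'c' + cs.count 'd') + 1 from by omega]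
              rw [ich_pascal_sub]
              rw [show ((cs.count 'c' : Int)) + dc - 1 = ((cs.count 'c' : Int)) + (dc + -1) from by ring]
              ring
            · simp [nOther, dab, dcd, ha, hb, hc, hd]
              ring

theorem combLoop_eq (n k : Nat) : combLoop (n : Int) (k : Int) = (n.choose k : Int) := by
  unfold combLoop
  rw [PySem.List.pyRange_zero_natCast, List.foldl_map]
  induction k with
  | zero => simp
  | succ k ih =>
      rw [List.range_succ, List.foldl_append, ih]
      simp only [List.foldl_cons, List.foldl_nil]
      by_cases h : k < n
      · have hsub : (n : Int) - (k : Int) = ((n - k : Nat) : Int) := by omega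
        rw [hsub]
        have : ((n.choose k : Nat) : Int) * ((n - k : Nat) : Int) = ((n.choose k * (n - k) : Nat) : Int) := by
          push_cast; ring
        rw [this, ← Nat.choose_succ_right_eq]
        have : ((k : Int) + 1) = ((k + 1 : Nat) : Int) := by push_cast; ring
        rw [this, PySem.Int.floordiv_natCast]
        exact congrArg _ (Nat.mul_div_cancel _ (Nat.succ_pos k))
      · have hch : n.choose (k + 1) = 0 := Nat.choose_eq_zero_of_lt (by omega)
        have hz : (n.choose k : Int) * ((n : Int) - (k : Int)) = 0 ∨
            (n.choose k : Int) * ((n : Int) - (k : Int)) ≤ 0 := by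
          by_cases hk : k = n
          · left; subst hk; simp
          · left
            have : n.choose k = 0 := Nat.choose_eq_zero_of_lt (by omega)
            simp [this]
        have hzz : (n.choose k : Int) * ((n : Int) - (k : Int)) = 0 := by
          rcases hz with h0 | h0
          · exact h0
          · by_cases hk : k = n
            · subst hk; simp
            · have : n.choose k = 0 := Nat.choose_eq_zero_of_lt (by omega)
              simp [this]
        rw [hzz, hch]
        rw [PySem.Int.floordiv_eq_ediv_of_pos (by omega)]
        simp

-- the ss built by A's bit tests, at index i, is subseq cs i
theorem ssA_eq (cs : List Char) (i : Nat) :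
    ((PySem.List.pyRange 0 (cs.length : Int)).filterMap (fun j =>
        if PySem.Int.band
            (PySem.List.pyGetD
              ((PySem.List.pyRange 0 (cs.length : Int)).map (fun j => (1 : Int) <<< j.toNat)) j 0)
            (i : Int) ≠ 0
        then PySem.List.pyGet? cs j else none))
      = subseq cs i := by
  have key : ∀ (m : List Char) (i : Nat),
      ((List.range m.length).filterMap (fun j =>
        if i.testBit j then m[j]? else none)) = subseq m i := by
    intro m
    induction m with
    | nil => intro i; rfl
    | cons x r ih =>
        intro i
        have hlen : (x :: r).length = r.length + 1 := rfl
        rw [hlen, List.range_succ_eq_map, List.filterMap_cons, List.filterMap_map]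
        have htail : (List.filterMap ((fun j => if i.testBit j then (x :: r)[j]? else none) ∘ Nat.succ)
            (List.range r.length)) = subseq r (i / 2) := by
          rw [← ih (i / 2)]
          apply List.filterMap_congr
          intro j _
          simp only [Function.comp]
          rw [Nat.testBit_succ]
          rfl
        rw [htail, Nat.testBit_zero]
        by_cases h : i % 2 = 1
        · simp only [h, decide_true, if_pos]
          simp [subseq, h]
        · simp only [h, decide_false]
          simp [subseq, h]
  rw [← key cs i]
  rw [PySem.List.pyRange_zero_natCast, List.filterMap_map]
  apply List.filterMap_congr
  intro j hj
  have hjlt : j < cs.length := by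
    have := List.mem_range.mp hj
    omega
  simp only [Function.comp, List.map_map, PySem.List.pyGetD_natCast]
  rw [PySem.List.getD_map_range _ _ _ _ hjlt]
  simp only [Function.comp_apply]
  simp only [Int.toNat_natCast, Int.one_shiftLeft]
  simp only [PySem.Int.band_natCast]
  have hband : (2 ^ j &&& i) = (i.testBit j).toNat * 2 ^ j := by
    rw [Nat.and_comm, Nat.and_two_pow]
  rw [hband]
  by_cases hbit : i.testBit j
  · rw [if_pos, if_pos hbit]
    · exact PySem.List.pyGet?_natCast cs j
    · rw [Int.natCast_ne_zero]
      simp [hbit]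
  · rw [if_neg, if_neg (by simp [hbit] : ¬ i.testBit j = true)]
    rw [Int.natCast_ne_zero]
    simp [hbit]

theorem Okb_zero_iff (t : List Char) :
    Okb t 0 0 = true ↔ (t.count 'a' = t.count 'b' ∧ t.count 'c' = t.count 'd') := by
  simp [Okb]
  omega

theorem pyRange_one_eq (N' : Nat) :
    PySem.List.pyRange 1 ((N' + 1 : Nat) : Int) =
      (List.range N').map (fun q => ((q + 1 : Nat) : Int)) := by
  have h0 := PySem.List.pyRange_zero_natCast (N' + 1)
  rw [PySem.List.pyRange_one_cons (by exact_mod_cast Nat.succ_pos N'), List.range_succ_eq_map,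
      List.map_cons, List.map_map] at h0
  have h1 : (0 : Int) + 1 = 1 := by ring
  rw [h1] at h0
  have := (List.cons.injEq _ _ _ _).mp h0
  rw [this.2]
  apply List.map_congr_left
  intro q _
  simp [Function.comp, Nat.succ_eq_add_one]

theorem okb_cond (t : List Char) (c : Int) :
    (if PySem.List.count t 'a' = PySem.List.count t 'b' ∧
        PySem.List.count t 'c' = PySem.List.count t 'd' then c + 1 else c)
      = (if Okb t 0 0 = true then c + 1 else c) := by
  refine if_congr ?_ rfl rfl
  rw [Okb_zero_iff]
  rfl

theorem A_eq (s : String) :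
    countSubs s = PySem.Int.mod ((G s.toList 0 0 : Int) - 1) (9 + 10 ^ 7) := by
  unfold countSubs
  dsimp only
  obtain ⟨N', hN'⟩ : ∃ N', 2 ^ s.toList.length = N' + 1 :=
    ⟨2 ^ s.toList.length - 1, by
      have := Nat.one_le_two_pow (n := s.toList.length); omega⟩
  have hpow : (2 : Int) ^ s.toList.length = ((N' + 1 : Nat) : Int) := by
    rw [← hN']; push_cast; ring
  rw [hpow, pyRange_one_eq, List.foldl_map]
  simp only [ssA_eq, okb_cond, PySem.List.foldl_count_if]
  have hG : G s.toList 0 0 =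
      (List.range N').countP (fun q => Okb (subseq s.toList (q + 1)) 0 0) + 1 := by
    unfold G
    rw [hN', List.range_succ_eq_map, List.countP_cons, List.countP_map]
    rw [subseq_zero]
    have hok : Okb [] 0 0 = true := by decide
    rw [hok]
    simp only [if_true]
    rfl
  rw [hG]
  push_cast
  ring_nf

theorem ich_natCast (n k : Nat) : ich n (k : Int) = n.choose k := by
  unfold ich
  rw [if_neg (by omega), Int.toNat_natCast]

theorem foldB (cs : List Char) (a b c d m : Int) :
    cs.foldl (fun (t : Int × Int × Int × Int × Int) ch =>
      let (na, nb, nc, nd, m) := t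
      if ch = 'a' then (na + 1, nb, nc, nd, m)
      else if ch = 'b' then (na, nb + 1, nc, nd, m)
      else if ch = 'c' then (na, nb, nc + 1, nd, m)
      else if ch = 'd' then (na, nb, nc, nd + 1, m)
      else (na, nb, nc, nd, m + 1)) (a, b, c, d, m)
    = (a + cs.count 'a', b + cs.count 'b', c + cs.count 'c', d + cs.count 'd', m + nOther cs) := by
  induction cs generalizing a b c d m with
  | nil => simp [nOther]
  | cons x cs ih =>
      simp only [List.foldl_cons]
      by_cases ha : x = 'a'
      · subst ha
        simp only [if_true]
        rw [ih]
        simp [nOther, Prod.ext_iff]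
        omega
      · by_cases hb : x = 'b'
        · subst hb
          simp only [if_neg (by decide : ¬('b' = 'a'))]
          rw [ih]
          simp [nOther, Prod.ext_iff]
          omega
        · by_cases hc : x = 'c'
          · subst hc
            simp only [if_neg (by decide : ¬('c' = 'a')), if_neg (by decide : ¬('c' = 'b'))]
            rw [ih]
            simp [nOther, Prod.ext_iff]
            omega
          · by_cases hd : x = 'd'
            · subst hd
              simp only [if_neg (by decide : ¬('d' = 'a')), if_neg (by decide : ¬('d' = 'b')),
                if_neg (by decide : ¬('d' = 'c'))]
              rw [ih]
              simp [nOther, Prod.ext_iff]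
              omega
            · simp only [if_neg ha, if_neg hb, if_neg hc, if_neg hd]
              rw [ih]
              simp [nOther, Prod.ext_iff, ha, hb, hc, hd]
              omega

theorem B_eq (s : String) :
    countSubs_alt s = PySem.Int.mod ((G s.toList 0 0 : Int) - 1) (10 ^ 7 + 9) := by
  unfold countSubs_alt
  dsimp only
  rw [foldB]
  simp only [zero_add]
  rw [show ((s.toList.count 'a' : Int) + (s.toList.count 'b' : Int))
        = ((s.toList.count 'a' + s.toList.count 'b' : Nat) : Int) from by push_cast; ring]
  rw [show ((s.toList.count 'c' : Int) + (s.toList.count 'd' : Int))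
        = ((s.toList.count 'c' + s.toList.count 'd' : Nat) : Int) from by push_cast; ring]
  rw [combLoop_eq, combLoop_eq, Int.toNat_natCast]
  rw [G_closed]
  rw [add_zero, add_zero, ich_natCast, ich_natCast]
  push_cast
  ring_nf

-- ===== VERDICT (by name: the statement is the Claim_ definition above) =====
theorem countSubs_spec : Claim_equal_countSubs := by
  intro s _
  unfold Spec_countSubs
  rw [A_eq, B_eq]
  norm_num
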